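-- pv_equiv track=rewrite | github.com/Ketema741/Competitive-programming-group4 | 0367-valid-perfect-square/0367-valid-perfect-square.py | isPerfectSquare
-- ===== SOURCE A (Python) =====
-- def isPerfectSquare(num: int) -> bool:
--
--     left, right = 1, num//2
--     if num == 1:
--         return True
--     while left <= right:
--         mid = left + (right - left)//2
--
--         sqr = mid**2
--         if sqr == num:
--             return True
--         if sqr < num:
--             left = mid + 1
--         else:
--             right = mid-1
--
--     return False
-- ===== SOURCE B (Python) =====
-- def isPerfectSquare(num: int) -> bool:
--     if num < 1:
--         return False
--     x = num
--     while x * x > num: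
--         x = (x + num // x) // 2
--     return x * x == num
-- ===== Notes on version B (the rewrite author's own statement) =====
-- stated objective: alternative
-- what changed: Replaces the binary search over a shrinking interval with an integer Newton iteration that maintains a single estimate converging down to the floor square root, then tests whether its square equals num.
import Mathlib
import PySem

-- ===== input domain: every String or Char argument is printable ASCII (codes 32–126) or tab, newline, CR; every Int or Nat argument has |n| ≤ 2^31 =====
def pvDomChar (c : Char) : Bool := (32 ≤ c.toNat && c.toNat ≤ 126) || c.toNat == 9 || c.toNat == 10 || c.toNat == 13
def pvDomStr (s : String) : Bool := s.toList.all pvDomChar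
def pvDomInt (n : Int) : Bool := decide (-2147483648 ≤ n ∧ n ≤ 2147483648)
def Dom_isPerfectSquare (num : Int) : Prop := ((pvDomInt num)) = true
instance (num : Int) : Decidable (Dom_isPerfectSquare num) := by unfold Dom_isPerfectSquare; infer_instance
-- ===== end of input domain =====

-- B replaces A's binary search over [1, num//2] with integer Newton iteration
-- x = (x + num//x)//2 converging to floor(sqrt(num)); alternative algorithm, similar cost.

-- ===== PORT A =====
-- the while-loop of A, state (left, right); measure (right + 1 - left).toNat
def pvGoA (num left right : Int) : Bool :=
  if h : left ≤ right then
    let mid := left + PySem.Int.floordiv (right - left) 2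
    if mid * mid == num then true
    else if mid * mid < num then pvGoA num (mid + 1) right
    else pvGoA num left (mid - 1)
  else false
termination_by (right + 1 - left).toNat
decreasing_by
  · have h1 : (0:Int) ≤ PySem.Int.floordiv (right - left) 2 :=
      (PySem.Int.le_floordiv_iff_mul_le (by norm_num)).mpr (by omega)
    omega
  · have h2 : PySem.Int.floordiv (right - left) 2 < (right - left) + 1 :=
      (PySem.Int.floordiv_lt_iff_lt_mul (by norm_num)).mpr (by omega)
    omega

def isPerfectSquare (num : Int) : Bool :=
  if num == 1 then true
  else pvGoA num 1 (PySem.Int.floordiv num 2)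

-- ===== PORT B =====
-- the while-loop of B; fuel only makes the loop total (num.toNat steps always
-- suffice: x strictly decreases each iteration, see pvNewton_eq_sqrt below)
def pvNewton (num : Int) : Nat → Int → Int
  | 0, x => x
  | fuel + 1, x =>
      if x * x > num then
        pvNewton num fuel (PySem.Int.floordiv (x + PySem.Int.floordiv num x) 2)
      else x

def isPerfectSquare_alt (num : Int) : Bool :=
  if num < 1 then false
  else
    let x := pvNewton num num.toNat num
    x * x == num

-- ===== PRECONDITION & SPEC =====
def Spec_isPerfectSquare (num : Int) (out : Bool) : Prop := out = isPerfectSquare_alt num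
instance (num : Int) (out : Bool) : Decidable (Spec_isPerfectSquare num out) := by unfold Spec_isPerfectSquare; infer_instance

-- ===== CLAIM (what is proved, stated in full; the proofs are below) =====
def Claim_equal_isPerfectSquare : Prop := ∀ (num : Int), Dom_isPerfectSquare num → Spec_isPerfectSquare num (isPerfectSquare num)

-- ===== LEMMAS AND PROOFS =====

-- floor of the real square root, as an Int, for num ≥ 0
def pvS (num : Int) : Int := (Nat.sqrt num.toNat : Int)

lemma pvS_sq_le (num : Int) (h : 0 ≤ num) : pvS num * pvS num ≤ num := by
  have := Nat.sqrt_le' num.toNat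
  unfold pvS
  rw [pow_two] at this
  omega

lemma pvS_lt_succ_sq (num : Int) : num < (pvS num + 1) * (pvS num + 1) := by
  have h := Nat.lt_succ_sqrt' num.toNat
  rw [pow_two, Nat.succ_eq_add_one] at h
  unfold pvS
  have h2 : ((num.toNat : Nat) : Int) < ((num.toNat.sqrt + 1 : Nat) : Int) * ((num.toNat.sqrt + 1 : Nat) : Int) := by
    exact_mod_cast h
  push_cast at h2
  omega

lemma pvS_pos (num : Int) (h : 1 ≤ num) : 1 ≤ pvS num := by
  unfold pvS
  have : 1 ≤ Nat.sqrt num.toNat := by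
    rw [Nat.le_sqrt]
    omega
  omega

-- Newton's iteration from any x ≥ floor √num reaches exactly floor √num
lemma pvNewton_eq_sqrt (num : Int) (hnum : 1 ≤ num) :
    ∀ (fuel : Nat) (x : Int), pvS num ≤ x → (x - pvS num).toNat ≤ fuel →
      pvNewton num fuel x = pvS num := by
  intro fuel
  induction fuel with
  | zero =>
      intro x hx hf
      have : x = pvS num := by omega
      simpa [pvNewton] using this
  | succ f ih =>
      intro x hx hf
      have hs1 : 1 ≤ pvS num := pvS_pos num hnum
      have hsq : pvS num * pvS num ≤ num := pvS_sq_le num (by omega)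
      have hlt : num < (pvS num + 1) * (pvS num + 1) := pvS_lt_succ_sq num
      rw [pvNewton]
      by_cases hc : x * x > num
      · simp only [hc, if_pos]
        -- x is strictly above the root
        have hxgt : pvS num < x := by
          rcases lt_or_eq_of_le hx with h | h
          · exact h
          · exfalso; rw [← h] at hc; omega
        have hxpos : 0 < x := by omega
        set q := PySem.Int.floordiv num x with hq
        have hq0 : 0 ≤ q := (PySem.Int.le_floordiv_iff_mul_le hxpos).mpr (by omega)
        have hqlt : q < x := (PySem.Int.floordiv_lt_iff_lt_mul hxpos).mpr (by nlinarith)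
        -- AM-GM, integer form: q ≥ 2·s − x
        have hqge : 2 * pvS num - x ≤ q := by
          by_cases h0 : 2 * pvS num - x ≤ 0
          · omega
          · exact (PySem.Int.le_floordiv_iff_mul_le hxpos).mpr (by nlinarith)
        set y := PySem.Int.floordiv (x + q) 2 with hy
        have hys : pvS num ≤ y := (PySem.Int.le_floordiv_iff_mul_le (by norm_num)).mpr (by omega)
        have hylt : y < x := (PySem.Int.floordiv_lt_iff_lt_mul (by norm_num)).mpr (by omega)
        exact ih y hys (by omega)
      · simp only [hc, if_neg, not_false_iff]
        -- x ≥ s and x² ≤ num < (s+1)² forces x = s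
        push_neg at hc
        nlinarith

-- B computes whether floor √num squares back to num
lemma alt_eq_sqrt_test (num : Int) (hnum : 1 ≤ num) :
    isPerfectSquare_alt num = (pvS num * pvS num == num) := by
  unfold isPerfectSquare_alt
  have hns : pvS num ≤ num := by
    have h1 := pvS_pos num hnum
    have h2 := pvS_sq_le num (by omega)
    nlinarith
  have h1 := pvS_pos num hnum
  have := pvNewton_eq_sqrt num hnum num.toNat num hns (by omega)
  simp only [if_neg (by omega : ¬ num < 1), this]

-- characterisation of A's binary search: true iff a root lies in [left, right]
lemma pvGoA_iff (num : Int) :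
    ∀ (left right : Int), 1 ≤ left →
      (pvGoA num left right = true ↔ ∃ k, left ≤ k ∧ k ≤ right ∧ k * k = num) := by
  intro left right
  induction left, right using pvGoA.induct num with
  | case1 left right h mid heq =>
      intro _
      have hm : mid = left + PySem.Int.floordiv (right - left) 2 := rfl
      clear_value mid
      have hmid : left ≤ mid ∧ mid ≤ right := by
        constructor
        · have : (0:Int) ≤ PySem.Int.floordiv (right - left) 2 :=
            (PySem.Int.le_floordiv_iff_mul_le (by norm_num)).mpr (by omega)
          omega
        · have : PySem.Int.floordiv (right - left) 2 < (right - left) + 1 :=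
            (PySem.Int.floordiv_lt_iff_lt_mul (by norm_num)).mpr (by omega)
          omega
      rw [pvGoA]
      simp only [dif_pos h, ← hm, heq, if_pos]
      constructor
      · intro _
        exact ⟨mid, hmid.1, hmid.2, by simpa using of_decide_eq_true heq⟩
      · intro _; trivial
  | case2 left right h mid hne hlt ih =>
      intro hl
      have hm : mid = left + PySem.Int.floordiv (right - left) 2 := rfl
      clear_value mid
      have hmidl : left ≤ mid := by
        have : (0:Int) ≤ PySem.Int.floordiv (right - left) 2 :=
          (PySem.Int.le_floordiv_iff_mul_le (by norm_num)).mpr (by omega)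
        omega
      rw [pvGoA]
      simp only [dif_pos h, ← hm]
      rw [if_neg (by simpa using hne), if_pos hlt]
      rw [ih (by omega)]
      constructor
      · rintro ⟨k, h1, h2, h3⟩; exact ⟨k, by omega, h2, h3⟩
      · rintro ⟨k, h1, h2, h3⟩
        refine ⟨k, ?_, h2, h3⟩
        by_contra hk
        push_neg at hk
        have : k * k ≤ mid * mid := by nlinarith
        omega
  | case3 left right h mid hne hge ih =>
      intro hl
      have hm : mid = left + PySem.Int.floordiv (right - left) 2 := rfl
      clear_value mid
      have hmid : left ≤ mid ∧ mid ≤ right := by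
        constructor
        · have : (0:Int) ≤ PySem.Int.floordiv (right - left) 2 :=
            (PySem.Int.le_floordiv_iff_mul_le (by norm_num)).mpr (by omega)
          omega
        · have : PySem.Int.floordiv (right - left) 2 < (right - left) + 1 :=
            (PySem.Int.floordiv_lt_iff_lt_mul (by norm_num)).mpr (by omega)
          omega
      have hnum_ne : mid * mid ≠ num := by simpa using hne
      have hgt : num < mid * mid := by
        rcases lt_trichotomy (mid * mid) num with h1 | h1 | h1
        · exact absurd h1 hge
        · exact absurd h1 hnum_ne
        · exact h1
      rw [pvGoA]
      simp only [dif_pos h, ← hm]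
      rw [if_neg (by simpa using hne), if_neg hge]
      rw [ih hl]
      constructor
      · rintro ⟨k, h1, h2, h3⟩; exact ⟨k, h1, by omega, h3⟩
      · rintro ⟨k, h1, h2, h3⟩
        refine ⟨k, h1, ?_, h3⟩
        by_contra hk
        push_neg at hk
        have : mid * mid ≤ k * k := by nlinarith
        omega
  | case4 left right h =>
      intro _
      rw [pvGoA]
      simp only [dif_neg h, Bool.false_eq_true]
      constructor
      · intro hfalse; exact absurd hfalse (by simp)
      · rintro ⟨k, h1, h2, _⟩; omega

-- ===== VERDICT (by name: the statement is the Claim_ definition above) =====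
theorem isPerfectSquare_spec : Claim_equal_isPerfectSquare := by
  intro num _
  unfold Spec_isPerfectSquare
  rcases lt_trichotomy num 1 with hlt | heq | hgt
  · -- num ≤ 0: both sides are false
    have hne : (num == 1) = false := by simp; omega
    have hr : PySem.Int.floordiv num 2 < 1 :=
      (PySem.Int.floordiv_lt_iff_lt_mul (by norm_num)).mpr (by omega)
    unfold isPerfectSquare isPerfectSquare_alt
    rw [pvGoA]
    simp only [hne, Bool.false_eq_true, if_false, dif_neg (by omega : ¬ (1:Int) ≤ PySem.Int.floordiv num 2)]
    simp [hlt]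
  · subst heq; decide
  · -- num ≥ 2
    have hnum : 2 ≤ num := by omega
    rw [alt_eq_sqrt_test num (by omega)]
    have hA := pvGoA_iff num 1 (PySem.Int.floordiv num 2) (le_refl 1)
    unfold isPerfectSquare
    rw [if_neg (by simp; omega)]
    rw [Bool.eq_iff_iff, hA]
    have hs1 := pvS_pos num (by omega)
    have hsq := pvS_sq_le num (by omega)
    have hlt2 := pvS_lt_succ_sq num
    constructor
    · rintro ⟨k, h1, h2, h3⟩
      have hks : k = pvS num := by nlinarith
      subst hks
      simpa using h3
    · intro hb
      have hb' : pvS num * pvS num = num := by simpa using of_decide_eq_true hb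
      refine ⟨pvS num, hs1, ?_, hb'⟩
      have hs2 : 2 ≤ pvS num := by nlinarith
      exact (PySem.Int.le_floordiv_iff_mul_le (by norm_num)).mpr (by nlinarith)
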